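-- pv_equiv track=rewrite | github.com/wns312/TIL | algorithm/Programmers/Level1/92334.py | solution
-- ===== SOURCE A (Python) =====
-- def solution(id_list, report, k):
--     report = list(set(report))
--     id_list_len = len(id_list)
--     report_dict: 'dict[str, set]' = {id_list[_]: set() for _ in range(id_list_len)}
--     reported_count_dict: 'dict[str, num]' = {id_list[_]: 0 for _ in range(id_list_len)}
--     result_count = [0] * id_list_len
--
--     for r in report:
--         reporter, reportee = r.split()
--         report_dict[reporter].add(reportee)
--
--     for i in range(id_list_len):
--         reportee_list = report_dict[id_list[i]]
--         for rpt in reportee_list: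
--             reported_count_dict[rpt] += 1
--
--     for i in range(id_list_len):
--         report_dict[id_list[i]]
--         while report_dict[id_list[i]]:
--             rpt = report_dict[id_list[i]].pop()
--             if reported_count_dict[rpt] >= k:
--                 result_count[i] += 1
--
--     return result_count
-- ===== SOURCE B (Python) =====
-- def solution(id_list, report, k):
--     # Direct definition, no dicts and no staged counting: result[i] is the number
--     # of distinct (reporter, reportee) pairs whose reporter is id_list[i] and whose
--     # reportee occurs as the second component of at least k distinct pairs.
--     pairs = {tuple(r.split()) for r in report}
--     snds = [tee for _, tee in pairs]
--     return [sum(1 for rep, tee in pairs if rep == u and snds.count(tee) >= k)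
--             for u in id_list]
-- ===== Notes on version B (the rewrite author's own statement) =====
-- stated objective: alternative
-- what changed: Replaces A's staged dict pipeline (dict of mutable per-reporter sets, a counting dict filled by a nested loop, then per-user while/pop draining loops mutating a result array) by a direct quantifier-style definition: dedupe the reports into pairs once and compute each entry by nested scans over that pair list, with no dicts and no mutation; it trades speed (quadratic scans) for a definition-shaped program.
-- outside the precondition, e.g. on solution(['a', 'a', 'b'], ['a b'], 1): A returns [1, 0, 0], B returns [1, 1, 0]
import Mathlib
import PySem

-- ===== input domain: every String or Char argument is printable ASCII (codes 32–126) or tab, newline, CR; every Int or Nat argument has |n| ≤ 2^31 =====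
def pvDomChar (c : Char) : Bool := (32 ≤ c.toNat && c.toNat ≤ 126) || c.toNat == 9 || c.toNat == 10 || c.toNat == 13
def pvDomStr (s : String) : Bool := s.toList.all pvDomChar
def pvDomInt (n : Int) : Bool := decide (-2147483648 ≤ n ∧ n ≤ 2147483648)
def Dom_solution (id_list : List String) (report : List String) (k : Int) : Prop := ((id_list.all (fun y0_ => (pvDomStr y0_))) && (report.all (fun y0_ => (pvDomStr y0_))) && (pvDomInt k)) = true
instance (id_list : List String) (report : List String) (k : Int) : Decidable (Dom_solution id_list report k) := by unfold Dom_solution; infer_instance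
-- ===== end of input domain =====

-- B replaces A's staged dict pipeline (per-reporter sets, a counting dict, while/pop
-- draining loops) by a direct definition: dedupe into pairs once, then nested scans
-- over the pair list with no dicts and no mutation (alternative; B is slower).

-- ===== PORT A =====
-- loop body of A's 'for r in report: reporter, reportee = r.split(); report_dict[reporter].add(reportee)'
def pvAAddStep (d : PySem.Dict String (PySem.Set String)) (r : String) :
    PySem.Dict String (PySem.Set String) :=
  match PySem.Str.split₀ r with
  | [reporter, reportee] => d.modify reporter PySem.Set.empty (fun s => PySem.Set.add s reportee)
  | _ => d

-- Python's set iteration order is not modelled; every consumption of a set in A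
-- (the count increments and the while/pop counting loop) is order-independent,
-- so the while/pop drain is ported as a fold over the set's element list.
def solution (id_list : List String) (report : List String) (k : Int) : List Int :=
  let report' : PySem.Set String := PySem.Set.ofList report
  let idListLen : Int := (id_list.length : Int)
  let reportDict : PySem.Dict String (PySem.Set String) :=
    (PySem.List.pyRange 0 idListLen 1).foldl
      (fun d i => d.insert (PySem.List.pyGetD id_list i "") PySem.Set.empty) PySem.Dict.empty
  let reportedCountDict : PySem.Dict String Int :=
    (PySem.List.pyRange 0 idListLen 1).foldl
      (fun d i => d.insert (PySem.List.pyGetD id_list i "") 0) PySem.Dict.empty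
  let resultCount : List Int := List.replicate id_list.length 0
  let reportDict := report'.foldl pvAAddStep reportDict
  let reportedCountDict :=
    (PySem.List.pyRange 0 idListLen 1).foldl
      (fun c i =>
        (reportDict.getD (PySem.List.pyGetD id_list i "") PySem.Set.empty).foldl
          (fun c rpt => c.modify rpt 0 (· + 1)) c)
      reportedCountDict
  -- the while/pop loop consumes report_dict[id_list[i]] and leaves it empty:
  -- the fold carries (result_count, report_dict) and empties the drained set
  ((PySem.List.pyRange 0 idListLen 1).foldl
    (fun st i =>
      ((st.2.getD (PySem.List.pyGetD id_list i "") PySem.Set.empty).foldl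
          (fun res rpt =>
            if reportedCountDict.getD rpt 0 ≥ k then
              res.set i.toNat (res.getD i.toNat 0 + 1)
            else res)
          st.1,
       st.2.insert (PySem.List.pyGetD id_list i "") PySem.Set.empty))
    (resultCount, reportDict)).1

-- ===== PORT B =====
-- B: pairs = {tuple(r.split()) for r in report}; snds = [tee for _, tee in pairs];
-- [sum(1 for rep, tee in pairs if rep == u and snds.count(tee) >= k) for u in id_list].
-- Tuple unpacking 'rep, tee' is ported as .getD 0 "" / .getD 1 "" on the token list
-- (exact on Pre_, where every report line splits into exactly two tokens).
def solution_alt (id_list : List String) (report : List String) (k : Int) : List Int :=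
  let pairs : PySem.Set (List String) :=
    report.foldl (fun s r => PySem.Set.add s (PySem.Str.split₀ r)) PySem.Set.empty
  let snds : List String := pairs.map (fun p => p.getD 1 "")
  id_list.map (fun u =>
    ((pairs.countP (fun p =>
        p.getD 0 "" == u && decide (((snds.count (p.getD 1 "") : Nat) : Int) ≥ k)) : Nat) : Int))

-- ===== PRECONDITION & SPEC =====
-- Pre_ excludes inputs where the Python A raises (a report entry that does not split
-- into exactly two tokens → ValueError, or a token absent from id_list → KeyError),
-- and id_lists with duplicate ids, on which A's returned value is an accident of
-- dict-key dedup plus draining shared sets (a defensible unspecified corner).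
def Pre_solution (id_list : List String) (report : List String) (k : Int) : Prop :=
  id_list.Nodup ∧
    ∀ r ∈ report, (PySem.Str.split₀ r).length = 2 ∧ ∀ t ∈ PySem.Str.split₀ r, t ∈ id_list
instance (id_list : List String) (report : List String) (k : Int) : Decidable (Pre_solution id_list report k) := by unfold Pre_solution; infer_instance

def pvWitness_solution : List String × List String × Int :=
  (["muzi", "frodo", "apeach", "neo"],
   (["muzi frodo", "apeach frodo", "frodo neo", "muzi neo", "apeach muzi"], 2))

def Spec_solution (id_list : List String) (report : List String) (k : Int) (out : List Int) : Prop := out = solution_alt id_list report k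
instance (id_list : List String) (report : List String) (k : Int) (out : List Int) : Decidable (Spec_solution id_list report k out) := by unfold Spec_solution; infer_instance

-- ===== CLAIM (what is proved, stated in full; the proofs are below) =====
def Claim_equal_solution : Prop := ∀ (id_list : List String) (report : List String) (k : Int), Dom_solution id_list report k → Pre_solution id_list report k → Spec_solution id_list report k (solution id_list report k)

-- ===== LEMMAS AND PROOFS =====

-- notation for the proof layer: a report line as a token list
def pvTok (r : String) : List String := PySem.Str.split₀ r
def pvFst (p : List String) : String := p.getD 0 ""
def pvSnd (p : List String) : String := p.getD 1 ""
-- the distinct (reporter, reportee) token pairs, in first-occurrence order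
def pvPairs (report : List String) : List (List String) :=
  PySem.Set.ofList (report.map pvTok)
-- the distinct reportees of u (first dedup the report strings, as A does)
def pvTees (report : List String) (u : String) : List String :=
  PySem.Set.ofList ((((PySem.Set.ofList report).map pvTok).filter (fun p => pvFst p == u)).map pvSnd)
-- the number of distinct pairs whose reportee is b
def pvCnt (report : List String) (b : String) : Int :=
  (((pvPairs report).map pvSnd).count b : Int)
-- the closed form both ports are proved equal to (B is this form, literally)
def pvSpec (id_list : List String) (report : List String) (k : Int) : List Int :=
  id_list.map (fun u =>
    ((pvPairs report).countP (fun p => pvFst p == u && decide (pvCnt report (pvSnd p) ≥ k)) : Int))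


-- ---- generic loop lemmas ----

theorem pv_getElem_eq_getD (l : List Int) (j : Nat) (h : j < l.length) : l[j] = l.getD j 0 := by
  rw [List.getD_eq_getElem?_getD, List.getElem?_eq_getElem h]
  rfl

theorem pv_getD_set_self (l : List Int) (i : Nat) (h : i < l.length) (v : Int) :
    (l.set i v).getD i 0 = v := by
  rw [List.getD_eq_getElem?_getD, List.getElem?_set_self h]; rfl

theorem pv_getD_set_ne (l : List Int) {i j : Nat} (h : i ≠ j) (v : Int) :
    (l.set i v).getD j 0 = l.getD j 0 := by
  rw [List.getD_eq_getElem?_getD, List.getElem?_set_ne h, ← List.getD_eq_getElem?_getD]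

theorem pv_getD_foldl_insert_zero (xs : List String) (d : PySem.Dict String Int) (b : String)
    (h : d.getD b 0 = 0) :
    (xs.foldl (fun d u => d.insert u 0) d).getD b 0 = 0 := by
  induction xs generalizing d with
  | nil => simpa using h
  | cons x xs ih =>
    simp only [List.foldl_cons]
    refine ih _ ?_
    rw [PySem.Dict.getD_insert]
    split <;> simp [h]

theorem pv_getD_foldl_insert_empty (xs : List String) (d : PySem.Dict String (PySem.Set String)) (b : String)
    (h : d.getD b PySem.Set.empty = PySem.Set.empty) :
    (xs.foldl (fun d u => d.insert u PySem.Set.empty) d).getD b PySem.Set.empty = PySem.Set.empty := by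
  induction xs generalizing d with
  | nil => simpa using h
  | cons x xs ih =>
    simp only [List.foldl_cons]
    refine ih _ ?_
    rw [PySem.Dict.getD_insert]
    split
    · rfl
    · exact h

theorem pv_getD_foldl_modify_addset {α : Type} (f g : α → String) (l : List α)
    (d : PySem.Dict String (PySem.Set String)) (u : String) :
    (l.foldl (fun d p => d.modify (f p) PySem.Set.empty
        (fun s => PySem.Set.add s (g p))) d).getD u PySem.Set.empty
      = PySem.Set.update (d.getD u PySem.Set.empty)
          ((l.filter (fun p => f p == u)).map g) := by
  induction l generalizing d with
  | nil => simp [PySem.Set.update]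
  | cons p l ih =>
    simp only [List.foldl_cons, List.filter_cons]
    rw [ih]
    by_cases hu : f p = u
    · rw [if_pos (by simp [hu]), List.map_cons]
      rw [PySem.Dict.getD_modify, if_pos hu.symm, hu]
      simp [PySem.Set.update]
    · rw [if_neg (by simp [hu]), PySem.Dict.getD_modify, if_neg (fun h => hu h.symm)]

theorem pv_getD_doublefold (xs : List String) (g : String → List String)
    (c : PySem.Dict String Int) (b : String) :
    (xs.foldl (fun c u => (g u).foldl (fun c rpt => c.modify rpt 0 (· + 1)) c) c).getD b 0
      = c.getD b 0 + ((xs.map (fun u => (((g u).count b : Nat) : Int))).sum) := by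
  induction xs generalizing c with
  | nil => simp
  | cons x xs ih =>
    simp only [List.foldl_cons, List.map_cons, List.sum_cons]
    rw [ih, PySem.Dict.getD_foldl_modify_add_one]
    ring

theorem pv_foldl_set_inc (s : List String) (cond : String → Prop) [DecidablePred cond] (res : List Int)
    (i : Nat) (h : i < res.length) :
    s.foldl (fun res b => if cond b then res.set i (res.getD i 0 + 1) else res) res
      = res.set i (res.getD i 0 + (s.countP (fun b => decide (cond b)) : Int)) := by
  induction s generalizing res with
  | nil => simp [List.set_getElem_self, List.getD_eq_getElem?_getD, List.getElem?_eq_getElem h]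
  | cons x s ih =>
    simp only [List.foldl_cons, List.countP_cons]
    by_cases hx : cond x
    · rw [if_pos hx, ih _ (by simpa using h), List.set_set]
      congr 1
      rw [pv_getD_set_self _ _ h]
      simp [hx]
      ring
    · rw [if_neg hx, ih _ h]
      simp [hx]

theorem pv_enumloop_length (xs : List String) (g : String → List String) (cond : String → Prop)
    [DecidablePred cond] (s : Nat) (res : List Int) (d : PySem.Dict String (PySem.Set String))
    (hd : ∀ u ∈ xs, d.getD u PySem.Set.empty = g u) (hnd : xs.Nodup)
    (hlen : s + xs.length ≤ res.length) :
    (((PySem.List.enumerate xs (s : Int)).foldl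
       (fun st p =>
         ((st.2.getD p.2 PySem.Set.empty).foldl
            (fun res b => if cond b then res.set p.1.toNat (res.getD p.1.toNat 0 + 1) else res) st.1,
          st.2.insert p.2 PySem.Set.empty))
       (res, d)).1).length = res.length := by
  induction xs generalizing s res d with
  | nil => simp [PySem.List.enumerate_nil]
  | cons x xs ih =>
    rw [PySem.List.enumerate_cons, List.foldl_cons]
    have hs : s < res.length := by simp at hlen; omega
    have hx : d.getD x PySem.Set.empty = g x := hd x List.mem_cons_self
    have hnx : x ∉ xs := by simp at hnd; exact hnd.1
    have hd' : ∀ u ∈ xs, (d.insert x PySem.Set.empty).getD u PySem.Set.empty = g u := by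
      intro u hu
      rw [PySem.Dict.getD_insert, if_neg (fun h => hnx (by rw [← h]; exact hu))]
      exact hd u (List.mem_cons_of_mem _ hu)
    have h1 : ((s : Int) + 1) = ((s + 1 : Nat) : Int) := by push_cast; ring
    simp only [hx, Int.toNat_natCast]
    rw [pv_foldl_set_inc _ _ _ _ hs, h1,
        ih _ _ _ hd' (by simp at hnd; exact hnd.2) (by simp; simp at hlen; omega)]
    simp

theorem pv_enumloop_getD (xs : List String) (g : String → List String) (cond : String → Prop)
    [DecidablePred cond] (s : Nat) (res : List Int) (d : PySem.Dict String (PySem.Set String))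
    (hd : ∀ u ∈ xs, d.getD u PySem.Set.empty = g u) (hnd : xs.Nodup)
    (hlen : s + xs.length ≤ res.length) (j : Nat) :
    (((PySem.List.enumerate xs (s : Int)).foldl
       (fun st p =>
         ((st.2.getD p.2 PySem.Set.empty).foldl
            (fun res b => if cond b then res.set p.1.toNat (res.getD p.1.toNat 0 + 1) else res) st.1,
          st.2.insert p.2 PySem.Set.empty))
       (res, d)).1).getD j 0
      = res.getD j 0 + (if s ≤ j ∧ j < s + xs.length
          then (((g (xs.getD (j - s) "")).countP (fun b => decide (cond b)) : Nat) : Int) else 0) := by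
  induction xs generalizing s res d with
  | nil => simp [PySem.List.enumerate_nil]
  | cons x xs ih =>
    rw [PySem.List.enumerate_cons, List.foldl_cons]
    have hs : s < res.length := by simp at hlen; omega
    have hx : d.getD x PySem.Set.empty = g x := hd x List.mem_cons_self
    have hnx : x ∉ xs := by simp at hnd; exact hnd.1
    have hd' : ∀ u ∈ xs, (d.insert x PySem.Set.empty).getD u PySem.Set.empty = g u := by
      intro u hu
      rw [PySem.Dict.getD_insert, if_neg (fun h => hnx (by rw [← h]; exact hu))]
      exact hd u (List.mem_cons_of_mem _ hu)
    have h1 : ((s : Int) + 1) = ((s + 1 : Nat) : Int) := by push_cast; ring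
    simp only [hx, Int.toNat_natCast]
    rw [pv_foldl_set_inc _ _ _ _ hs, h1,
        ih _ _ _ hd' (by simp at hnd; exact hnd.2) (by simp; simp at hlen; omega)]
    by_cases hj : j = s
    · subst hj
      have h2 : ¬(j+1 ≤ j ∧ j < j+1+xs.length) := by omega
      have h3 : j ≤ j ∧ j < j + (x :: xs).length := ⟨le_refl j, by simp⟩
      rw [if_neg h2, if_pos h3, pv_getD_set_self _ _ hs]
      simp
    · rw [pv_getD_set_ne _ (fun h => hj h.symm)]
      by_cases hrange : s + 1 ≤ j ∧ j < s + 1 + xs.length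
      · rw [if_pos hrange, if_pos (by simp; omega)]
        have : j - s = (j - (s+1)) + 1 := by omega
        rw [this]
        simp
      · rw [if_neg hrange, if_neg (by simp; omega)]

-- ---- the membership / permutation layer ----

theorem pv_shape (id_list report : List String)
    (hrep : ∀ r ∈ report, (pvTok r).length = 2 ∧ ∀ t ∈ pvTok r, t ∈ id_list) :
    ∀ p ∈ pvPairs report, ∃ a b, p = [a, b] ∧ a ∈ id_list ∧ b ∈ id_list := by
  intro p hp
  rw [pvPairs, PySem.Set.mem_ofList, List.mem_map] at hp
  obtain ⟨r, hr, rfl⟩ := hp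
  obtain ⟨hlen, hmem⟩ := hrep r hr
  match htok : pvTok r, hlen with
  | [a, b], _ =>
    exact ⟨a, b, rfl, hmem a (by rw [htok]; simp), hmem b (by rw [htok]; simp)⟩

theorem pv_mem_map_tok_set (report : List String) (p : List String) :
    p ∈ (PySem.Set.ofList report).map pvTok ↔ p ∈ pvPairs report := by
  rw [pvPairs, PySem.Set.mem_ofList, List.mem_map, List.mem_map]
  constructor
  · rintro ⟨r, hr, rfl⟩
    exact ⟨r, (PySem.Set.mem_ofList report r).mp hr, rfl⟩
  · rintro ⟨r, hr, rfl⟩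
    exact ⟨r, (PySem.Set.mem_ofList report r).mpr hr, rfl⟩

theorem pv_mem_tees (report : List String) (u b : String) :
    b ∈ pvTees report u ↔ ∃ p ∈ pvPairs report, pvFst p = u ∧ pvSnd p = b := by
  rw [pvTees, PySem.Set.mem_ofList, List.mem_map]
  constructor
  · rintro ⟨p, hp, rfl⟩
    rw [List.mem_filter] at hp
    exact ⟨p, (pv_mem_map_tok_set report p).mp hp.1, by simpa using hp.2, rfl⟩
  · rintro ⟨p, hp, hfst, rfl⟩
    exact ⟨p, List.mem_filter.mpr ⟨(pv_mem_map_tok_set report p).mpr hp, by simpa using hfst⟩, rfl⟩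

theorem pv_nodup_pairs (report : List String) : (pvPairs report).Nodup :=
  PySem.Set.nodup_ofList _

theorem pv_nodup_tees (report : List String) (u : String) : (pvTees report u).Nodup :=
  PySem.Set.nodup_ofList _

-- A's total incoming count of b equals the count of distinct pairs ending in b
theorem pv_cnt_eq (id_list report : List String) (hnd : id_list.Nodup)
    (hrep : ∀ r ∈ report, (pvTok r).length = 2 ∧ ∀ t ∈ pvTok r, t ∈ id_list) (b : String) :
    ((id_list.map (fun u => (((pvTees report u).count b : Nat) : Int))).sum) = pvCnt report b := by
  have hperm : ((pvPairs report).filter (fun p => pvSnd p == b)).map pvFst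
      |>.Perm (id_list.filter (fun u => decide (b ∈ pvTees report u))) := by
    rw [List.perm_ext_iff_of_nodup]
    · intro a
      rw [List.mem_map, List.mem_filter]
      constructor
      · rintro ⟨p, hp, rfl⟩
        rw [List.mem_filter] at hp
        obtain ⟨a', b', rfl, ha', hb'⟩ := pv_shape id_list report hrep p hp.1
        refine ⟨ha', by simp [(pv_mem_tees report _ b).mpr ⟨_, hp.1, rfl, by simpa using hp.2⟩]⟩
      · rintro ⟨ha, hb⟩
        obtain ⟨p, hp, hfst, hsnd⟩ := (pv_mem_tees report a b).mp (by simpa using hb)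
        exact ⟨p, List.mem_filter.mpr ⟨hp, by simp [hsnd]⟩, hfst⟩
    · rw [List.nodup_map_iff_inj_on ((pv_nodup_pairs report).filter _)]
      intro p hp q hq hfq
      rw [List.mem_filter] at hp hq
      obtain ⟨a1, b1, rfl, _, _⟩ := pv_shape id_list report hrep p hp.1
      obtain ⟨a2, b2, rfl, _, _⟩ := pv_shape id_list report hrep q hq.1
      have h1 : b1 = b := by simpa using hp.2
      have h2 : b2 = b := by simpa using hq.2
      have h3 : a1 = a2 := by simpa [pvFst] using hfq
      rw [h1, h2, h3]
    · exact hnd.filter _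
  have hlen := hperm.length_eq
  rw [List.length_map] at hlen
  calc ((id_list.map (fun u => (((pvTees report u).count b : Nat) : Int))).sum)
      = ((id_list.map (fun u => if decide (b ∈ pvTees report u) then (1:Int) else 0)).sum) := by
        congr 1
        apply List.map_congr_left
        intro u _
        by_cases hb : b ∈ pvTees report u
        · simp [hb, List.count_eq_one_of_mem (pv_nodup_tees report u) hb]
        · simp [hb, List.count_eq_zero_of_not_mem hb]
    _ = (List.countP (fun u => decide (b ∈ pvTees report u)) id_list : Int) := by
        exact PySem.List.sum_map_ite_one_zero _ _
    _ = pvCnt report b := by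
        rw [pvCnt, List.count_eq_countP, List.countP_map, List.countP_eq_length_filter,
            List.countP_eq_length_filter, ← hlen]
        rfl

-- per-user: counting over the distinct reportees of u equals counting over the pairs with first u
theorem pv_entry_eq (id_list report : List String)
    (hrep : ∀ r ∈ report, (pvTok r).length = 2 ∧ ∀ t ∈ pvTok r, t ∈ id_list)
    (u : String) (cond : String → Bool) :
    ((pvTees report u).countP cond : Int)
      = ((pvPairs report).countP (fun p => pvFst p == u && cond (pvSnd p)) : Int) := by
  have hperm : ((pvPairs report).filter (fun p => pvFst p == u)).map pvSnd |>.Perm (pvTees report u) := by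
    rw [List.perm_ext_iff_of_nodup]
    · intro b
      rw [List.mem_map, pv_mem_tees]
      constructor
      · rintro ⟨p, hp, rfl⟩
        rw [List.mem_filter] at hp
        exact ⟨p, hp.1, by simpa using hp.2, rfl⟩
      · rintro ⟨p, hp, hfst, rfl⟩
        exact ⟨p, List.mem_filter.mpr ⟨hp, by simp [hfst]⟩, rfl⟩
    · rw [List.nodup_map_iff_inj_on ((pv_nodup_pairs report).filter _)]
      intro p hp q hq hfq
      rw [List.mem_filter] at hp hq
      obtain ⟨a1, b1, rfl, _, _⟩ := pv_shape id_list report hrep p hp.1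
      obtain ⟨a2, b2, rfl, _, _⟩ := pv_shape id_list report hrep q hq.1
      have h1 : a1 = u := by simpa using hp.2
      have h2 : a2 = u := by simpa using hq.2
      have h3 : b1 = b2 := by simpa [pvSnd] using hfq
      rw [h1, h2, h3]
    · exact pv_nodup_tees report u
  congr 1
  rw [← hperm.countP_eq cond, List.countP_map, List.countP_filter]
  apply List.countP_congr
  intro p _
  simp [Function.comp, Bool.and_comm]

-- ---- port characterizations ----

-- B is the closed form, almost definitionally: its deduped pair fold is pvPairs
theorem pv_B_char (id_list report : List String) (k : Int) :
    solution_alt id_list report k = pvSpec id_list report k := by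
  have hpairs : report.foldl (fun s r => PySem.Set.add s (PySem.Str.split₀ r)) PySem.Set.empty
      = pvPairs report := by
    rw [pvPairs, PySem.Set.ofList_eq_foldl, List.foldl_map]
    rfl
  simp only [solution_alt, hpairs]
  rfl

theorem pv_A_char (id_list report : List String) (k : Int) (hnd : id_list.Nodup)
    (hrep : ∀ r ∈ report, (pvTok r).length = 2 ∧ ∀ t ∈ pvTok r, t ∈ id_list) :
    solution id_list report k = pvSpec id_list report k := by
  simp only [solution]
  have hpy0 : (0:Int) ≤ 0 := le_refl 0
  -- the initial dicts, built over range(len(id_list)), are folds over id_list itself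
  rw [PySem.List.foldl_pyRange_pyGetD' (a := 0) id_list ""
        (fun d u => PySem.Dict.insert d u PySem.Set.empty) PySem.Dict.empty hpy0,
      PySem.List.foldl_pyRange_pyGetD' (a := 0) id_list ""
        (fun d u => PySem.Dict.insert d u (0:Int)) PySem.Dict.empty hpy0]
  rw [show List.drop (Int.toNat 0) id_list = id_list from rfl]
  set RD : PySem.Dict String (PySem.Set String) :=
    List.foldl pvAAddStep
      (List.foldl (fun d u => d.insert u PySem.Set.empty) PySem.Dict.empty id_list)
      (PySem.Set.ofList report) with hRD0
  have hRD : ∀ u, RD.getD u PySem.Set.empty = pvTees report u := by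
    intro u
    rw [hRD0]
    have hstep : List.foldl pvAAddStep
        (List.foldl (fun d u => d.insert u PySem.Set.empty) PySem.Dict.empty id_list)
        (PySem.Set.ofList report)
        = List.foldl (fun d r => PySem.Dict.modify d (pvFst (pvTok r)) PySem.Set.empty
              (fun s => PySem.Set.add s (pvSnd (pvTok r))))
            (List.foldl (fun d u => d.insert u PySem.Set.empty) PySem.Dict.empty id_list)
            (PySem.Set.ofList report) :=
      PySem.List.foldl_congr_mem _ _ _ _ (fun acc r hr => by
        have hr' := (PySem.Set.mem_ofList report r).mp hr
        obtain ⟨hlen, -⟩ := hrep r hr'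
        match htok : pvTok r, hlen with
        | [a, b], _ =>
          have hsp : PySem.Str.split₀ r = [a, b] := htok
          rw [pvAAddStep, hsp]
          rfl)
    rw [hstep, ← List.foldl_map (f := pvTok)
          (g := fun d p => PySem.Dict.modify d (pvFst p) PySem.Set.empty
            (fun s => PySem.Set.add s (pvSnd p))),
        pv_getD_foldl_modify_addset pvFst pvSnd,
        pv_getD_foldl_insert_empty _ _ _ (PySem.Dict.getD_empty _ _)]
    rw [pvTees, PySem.Set.ofList_eq_foldl]
    rfl
  set CD : PySem.Dict String Int :=
    List.foldl
      (fun c u => List.foldl (fun c rpt => c.modify rpt 0 fun x => x + 1) c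
        (RD.getD u PySem.Set.empty))
      (List.foldl (fun d u => d.insert u 0) PySem.Dict.empty id_list) id_list with hCD0
  rw [show (List.foldl
      (fun c i => List.foldl (fun c rpt => c.modify rpt 0 fun x => x + 1) c
        (RD.getD (PySem.List.pyGetD id_list i "") PySem.Set.empty))
      (List.foldl (fun d u => d.insert u 0) PySem.Dict.empty id_list)
      (PySem.List.pyRange 0 (id_list.length : Int))) = CD by
    rw [hCD0]
    exact PySem.List.foldl_pyRange_pyGetD' (a := 0) id_list ""
      (fun (c : PySem.Dict String Int) u =>
        List.foldl (fun (c : PySem.Dict String Int) rpt => c.modify rpt 0 fun x => x + 1) c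
          (RD.getD u PySem.Set.empty)) _ hpy0]
  have hCD : ∀ b, CD.getD b 0 = pvCnt report b := by
    intro b
    rw [hCD0]
    simp only [hRD]
    rw [pv_getD_doublefold id_list (pvTees report) _ b,
        pv_getD_foldl_insert_zero _ _ _ (PySem.Dict.getD_empty _ _), zero_add]
    exact pv_cnt_eq id_list report hnd hrep b
  -- the result loop over range(len(id_list)) is a loop over enumerate(id_list)
  have hswap : (((PySem.List.enumerate id_list 0).foldl
      (fun st p =>
        ((st.2.getD p.2 PySem.Set.empty).foldl
           (fun res rpt => if CD.getD rpt 0 ≥ k then res.set p.1.toNat (res.getD p.1.toNat 0 + 1) else res)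
           st.1,
         st.2.insert p.2 PySem.Set.empty))
      ((List.replicate id_list.length (0:Int)), RD)).1)
      = (((PySem.List.pyRange 0 (id_list.length : Int)).foldl
        (fun st i =>
          ((st.2.getD (PySem.List.pyGetD id_list i "") PySem.Set.empty).foldl
             (fun res rpt => if CD.getD rpt 0 ≥ k then res.set i.toNat (res.getD i.toNat 0 + 1) else res)
             st.1,
           st.2.insert (PySem.List.pyGetD id_list i "") PySem.Set.empty))
        ((List.replicate id_list.length (0:Int)), RD)).1) := by
    rw [PySem.List.enumerate_eq_map_pyRange id_list "", List.foldl_map]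
    rfl
  refine hswap.symm.trans ?_
  have hdRD : ∀ u ∈ id_list, RD.getD u PySem.Set.empty = pvTees report u := fun u _ => hRD u
  apply List.ext_getElem
  · have hlen := pv_enumloop_length id_list (pvTees report) (fun rpt => CD.getD rpt 0 ≥ k) 0
      (List.replicate id_list.length (0:Int)) RD hdRD hnd (by simp)
    rw [Nat.cast_zero] at hlen
    rw [hlen]
    simp [pvSpec]
  · intro j h1 h2
    have hjn : j < id_list.length := by
      simpa [pvSpec] using h2
    have hget := pv_enumloop_getD id_list (pvTees report) (fun rpt => CD.getD rpt 0 ≥ k) 0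
      (List.replicate id_list.length (0:Int)) RD hdRD hnd (by simp) j
    rw [Nat.cast_zero] at hget
    rw [pv_getElem_eq_getD _ _ h1, pv_getElem_eq_getD _ _ h2, hget]
    have hrepl : (List.replicate id_list.length (0:Int)).getD j 0 = 0 := by
      rw [List.getD_eq_getElem?_getD, List.getElem?_replicate]
      simp [hjn]
    rw [hrepl, zero_add, if_pos ⟨Nat.zero_le j, by simpa using hjn⟩]
    have hgetd : id_list.getD (j - 0) "" = id_list[j] := by
      rw [Nat.sub_zero, List.getD_eq_getElem?_getD, List.getElem?_eq_getElem hjn]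
      rfl
    rw [hgetd]
    have hcondeq : List.countP (fun b => decide (CD.getD b 0 ≥ k)) (pvTees report id_list[j])
        = List.countP (fun b => decide (pvCnt report b ≥ k)) (pvTees report id_list[j]) :=
      List.countP_congr (fun b _ => by rw [hCD b])
    rw [hcondeq]
    have hspec : (pvSpec id_list report k).getD j 0
        = ((pvPairs report).countP
            (fun p => pvFst p == id_list[j] && decide (pvCnt report (pvSnd p) ≥ k)) : Int) := by
      rw [pvSpec, List.getD_eq_getElem?_getD, List.getElem?_map,
          List.getElem?_eq_getElem hjn]
      simp
    rw [hspec]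
    exact pv_entry_eq id_list report hrep id_list[j] (fun b => decide (pvCnt report b ≥ k))

-- ===== VERDICT (by name: the statement is the Claim_ definition above) =====
theorem solution_spec : Claim_equal_solution := by
  intro id_list report k _ hpre
  obtain ⟨hnd, hrep⟩ := hpre
  unfold Spec_solution
  rw [pv_A_char id_list report k hnd hrep, pv_B_char id_list report k]
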